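-- pv_equiv track=rewrite | github.com/Satwik055/miner-registration-service | FlaskApp/__init__.py | divide_into_batches
-- ===== SOURCE A (Python) =====
-- def divide_into_batches(number_of_batches):
--
--     if number_of_batches <= 0:
--         raise ValueError("Number of batches must be a positive integer.")
--
--     batch_size = 100000000 // number_of_batches
--     remainder = 100000000 % number_of_batches
--
--     ranges = []
--     start = 10000000
--
--     for i in range(number_of_batches):
--         end = start + batch_size + (1 if i < remainder else 0)  # Add 1 to some batches to handle remainder
--         ranges.append((start, end - 1))
--         start = end
--
--     return ranges
-- ===== SOURCE B (Python) =====
-- def divide_into_batches(number_of_batches):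
--     if number_of_batches <= 0:
--         raise ValueError("Number of batches must be a positive integer.")
--
--     batch_size = 100000000 // number_of_batches
--     remainder = 100000000 % number_of_batches
--
--     # Stateless: batch i's bounds are computed directly from its index.
--     return [
--         (
--             10000000 + i * batch_size + min(i, remainder),
--             10000000 + i * batch_size + min(i, remainder)
--             + batch_size + (1 if i < remainder else 0) - 1,
--         )
--         for i in range(number_of_batches)
--     ]
-- ===== Notes on version B (the rewrite author's own statement) =====
-- stated objective: alternative
-- what changed: Replaces the accumulator loop threading the previous batch end forward with a stateless comprehension computing each batch's bounds in closed form from its index (start = 10000000 + i*batch_size + min(i, remainder)).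
import Mathlib
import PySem

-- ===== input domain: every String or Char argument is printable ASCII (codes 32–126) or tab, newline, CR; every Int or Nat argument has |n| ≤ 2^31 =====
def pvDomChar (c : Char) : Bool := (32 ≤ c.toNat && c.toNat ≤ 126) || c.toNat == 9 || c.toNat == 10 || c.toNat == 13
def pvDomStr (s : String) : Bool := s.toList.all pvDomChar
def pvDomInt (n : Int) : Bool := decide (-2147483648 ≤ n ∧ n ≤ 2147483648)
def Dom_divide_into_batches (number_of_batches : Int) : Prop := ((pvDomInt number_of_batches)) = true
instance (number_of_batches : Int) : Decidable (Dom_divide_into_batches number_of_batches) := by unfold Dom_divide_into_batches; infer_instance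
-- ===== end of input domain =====

-- B replaces A's accumulator loop (threading `start`) with a stateless closed form per index;
-- equivalence is proved on all positive counts (A raises ValueError otherwise).

-- ===== PORT A =====
def divide_into_batches (number_of_batches : Int) : List (Int × Int) :=
  if number_of_batches ≤ 0 then []  -- Python raises ValueError here; excluded by Pre_
  else
    let batch_size := PySem.Int.floordiv 100000000 number_of_batches
    let remainder := PySem.Int.mod 100000000 number_of_batches
    let res := (PySem.List.pyRange 0 number_of_batches 1).foldl
      (fun (st : List (Int × Int) × Int) i =>
        let e := st.2 + batch_size + (if i < remainder then 1 else 0)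
        (st.1 ++ [(st.2, e - 1)], e))
      ([], 10000000)
    res.1

-- ===== PORT B =====
def divide_into_batches_alt (number_of_batches : Int) : List (Int × Int) :=
  if number_of_batches ≤ 0 then []  -- Python raises ValueError here; excluded by Pre_
  else
    let batch_size := PySem.Int.floordiv 100000000 number_of_batches
    let remainder := PySem.Int.mod 100000000 number_of_batches
    (PySem.List.pyRange 0 number_of_batches 1).map
      (fun i =>
        (10000000 + i * batch_size + min i remainder,
         10000000 + i * batch_size + min i remainder
           + batch_size + (if i < remainder then 1 else 0) - 1))

-- ===== PRECONDITION & SPEC =====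
-- A raises ValueError for number_of_batches ≤ 0; exactly those inputs are excluded.
def Pre_divide_into_batches (number_of_batches : Int) : Prop := 0 < number_of_batches
instance (number_of_batches : Int) : Decidable (Pre_divide_into_batches number_of_batches) := by unfold Pre_divide_into_batches; infer_instance
def pvWitness_divide_into_batches : Int := (3)
def Spec_divide_into_batches (number_of_batches : Int) (out : List (Int × Int)) : Prop := out = divide_into_batches_alt number_of_batches
instance (number_of_batches : Int) (out : List (Int × Int)) : Decidable (Spec_divide_into_batches number_of_batches out) := by unfold Spec_divide_into_batches; infer_instance

-- ===== CLAIM (what is proved, stated in full; the proofs are below) =====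
def Claim_equal_divide_into_batches : Prop := ∀ (number_of_batches : Int), Dom_divide_into_batches number_of_batches → Pre_divide_into_batches number_of_batches → Spec_divide_into_batches number_of_batches (divide_into_batches number_of_batches)

-- ===== LEMMAS AND PROOFS =====

-- A's loop over range(m) reaches exactly the closed-form state B computes per index.
theorem divide_loop_closed (bs r : Int) (hr : 0 ≤ r) (m : Nat) :
    (PySem.List.pyRange 0 (m : Int) 1).foldl
      (fun (st : List (Int × Int) × Int) i =>
        let e := st.2 + bs + (if i < r then 1 else 0)
        (st.1 ++ [(st.2, e - 1)], e))
      ([], 10000000)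
    = ((PySem.List.pyRange 0 (m : Int) 1).map
        (fun i => (10000000 + i * bs + min i r,
                   10000000 + i * bs + min i r + bs + (if i < r then 1 else 0) - 1)),
       10000000 + m * bs + min (m : Int) r) := by
  induction m with
  | zero => simp [PySem.List.pyRange_one_eq_nil]; omega
  | succ k ih =>
      rw [show ((k + 1 : Nat) : Int) = (k : Int) + 1 by push_cast; ring,
          PySem.List.pyRange_one_succ_right (by positivity)]
      rw [List.foldl_append, ih, List.map_append]
      simp only [List.foldl_cons, List.foldl_nil, List.map_cons, List.map_nil]
      rw [Prod.mk.injEq]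
      refine ⟨rfl, ?_⟩
      have hmin : min ((k : Int) + 1) r = min (k : Int) r + (if (k : Int) < r then 1 else 0) := by
        by_cases hk : (k : Int) < r <;> simp [hk] <;> omega
      rw [hmin]; ring

theorem divide_into_batches_spec' (n : Int) (hn : 0 < n) :
    divide_into_batches n = divide_into_batches_alt n := by
  have hr : 0 ≤ PySem.Int.mod 100000000 n := PySem.Int.mod_nonneg _ hn
  unfold divide_into_batches divide_into_batches_alt
  rw [if_neg (by omega), if_neg (by omega)]
  have hm : n = ((n.toNat : Nat) : Int) := by omega
  rw [hm] at hr ⊢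
  exact congrArg Prod.fst (divide_loop_closed (PySem.Int.floordiv 100000000 (n.toNat : Int))
    (PySem.Int.mod 100000000 (n.toNat : Int)) hr n.toNat)

-- ===== VERDICT (by name: the statement is the Claim_ definition above) =====
theorem divide_into_batches_spec : Claim_equal_divide_into_batches := by
  intro n _ hpre
  exact divide_into_batches_spec' n hpre
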